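-- pv_equiv track=rewrite | github.com/thealper2/codewars-solutions | 7-kyu/spin_around_touch_the_ground.py | spin_around
-- ===== SOURCE A (Python) =====
-- def spin_around(lst):
--     degree = 0
--     for item in lst:
--         if item == 'right':
--             degree += 90
--         elif item == 'left':
--             degree -= 90
--
--     result = abs(degree) // 360
--     return result
-- ===== SOURCE B (Python) =====
-- def spin_around(lst):
--     # Stack-cancellation: opposite adjacent turns cancel; what remains is a
--     # homogeneous pile of quarter-turns, and every 4 of them is a full spin.
--     stack = []
--     for item in lst:
--         if item == 'left' or item == 'right':
--             if stack and stack[-1] != item: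
--                 stack.pop()
--             else:
--                 stack.append(item)
--     return len(stack) // 4
-- ===== Notes on version B (the rewrite author's own statement) =====
-- stated objective: alternative
-- what changed: Replaced A's signed degree accumulator with a stack that cancels opposite turns; the leftover homogeneous stack's length divided by 4 gives the spins.
import Mathlib
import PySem

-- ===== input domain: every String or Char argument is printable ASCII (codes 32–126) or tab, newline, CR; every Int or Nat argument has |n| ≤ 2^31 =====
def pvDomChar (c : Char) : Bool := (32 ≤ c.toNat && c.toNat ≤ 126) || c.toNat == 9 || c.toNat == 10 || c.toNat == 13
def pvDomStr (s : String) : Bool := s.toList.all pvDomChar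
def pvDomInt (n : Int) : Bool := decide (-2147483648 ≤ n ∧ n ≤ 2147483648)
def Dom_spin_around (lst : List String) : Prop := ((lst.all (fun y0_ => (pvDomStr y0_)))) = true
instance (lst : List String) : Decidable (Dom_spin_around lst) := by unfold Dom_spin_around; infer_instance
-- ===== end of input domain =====

-- B replaces A's signed degree accumulator with a stack cancelling opposite turns (alternative algorithm, same cost).


-- ===== PORT A =====
def spin_around (lst : List String) : Int :=
  let degree := lst.foldl (fun d item =>
    if item == "right" then d + 90
    else if item == "left" then d - 90
    else d) (0 : Int)
  PySem.Int.floordiv |degree| 360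

-- ===== PORT B =====
-- stack top is the list head; pop cancels an opposite turn, else push
def spinStep (s : List String) (item : String) : List String :=
  if item == "left" || item == "right" then
    match s with
    | top :: rest => if top != item then rest else item :: top :: rest
    | [] => [item]
  else s

def spin_around_alt (lst : List String) : Int :=
  let stack := lst.foldl spinStep ([] : List String)
  PySem.Int.floordiv (stack.length : Int) 4

-- ===== PRECONDITION & SPEC =====
def Spec_spin_around (lst : List String) (out : Int) : Prop := out = spin_around_alt lst
instance (lst : List String) (out : Int) : Decidable (Spec_spin_around lst out) := by unfold Spec_spin_around; infer_instance

-- ===== CLAIM (what is proved, stated in full; the proofs are below) =====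
def Claim_equal_spin_around : Prop := ∀ (lst : List String), Dom_spin_around lst → Spec_spin_around lst (spin_around lst)

-- ===== LEMMAS AND PROOFS =====

-- net quarter-turns of a list (right = +1, left = -1)
def pvNet (l : List String) : Int := (l.count "right" : Int) - (l.count "left" : Int)

-- homogeneity invariant for B's stack
def pvHom (s : List String) : Prop := (∀ x ∈ s, x = "right") ∨ (∀ x ∈ s, x = "left")

theorem pvHom_len (s : List String) (h : pvHom s) : (s.length : Int) = |pvNet s| := by
  cases h with
  | inl h =>
    have hr : s.count "right" = s.length := List.count_eq_length.mpr (by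
      intro x hx; simp [h x hx])
    have hl : s.count "left" = 0 := by
      rw [List.count_eq_zero]; intro hm; have := h _ hm; simp at this
    simp [pvNet, hr, hl]
  | inr h =>
    have hl : s.count "left" = s.length := List.count_eq_length.mpr (by
      intro x hx; simp [h x hx])
    have hr : s.count "right" = 0 := by
      rw [List.count_eq_zero]; intro hm; have := h _ hm; simp at this
    simp [pvNet, hr, hl]

theorem spinStep_inv (s : List String) (item : String) (h : pvHom s) :
    pvHom (spinStep s item) ∧ pvNet (spinStep s item) = pvNet s + pvNet [item] := by
  unfold spinStep
  by_cases hi : item = "left" ∨ item = "right"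
  · have hb : (item == "left" || item == "right") = true := by
      rcases hi with h' | h' <;> simp [h']
    rw [hb]
    cases s with
    | nil =>
      rcases hi with h' | h' <;>
        constructor <;> simp [pvHom, pvNet, h']
    | cons top rest =>
      by_cases ht : top = item
      · have : (top != item) = false := by simp [ht]
        simp only [this, Bool.false_eq_true, if_false]
        constructor
        · cases h with
          | inl hh => exact Or.inl (by intro x hx; simp at hx
                                       rcases hx with rfl | rfl | hx
                                       · rw [← ht]; exact hh _ (by simp)
                                       · exact hh _ (by simp)
                                       · exact hh _ (by simp [hx]))
          | inr hh => exact Or.inr (by intro x hx; simp at hx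
                                       rcases hx with rfl | rfl | hx
                                       · rw [← ht]; exact hh _ (by simp)
                                       · exact hh _ (by simp)
                                       · exact hh _ (by simp [hx]))
        · rcases hi with h' | h' <;>
            subst h' <;>
            · rw [ht] at h ⊢
              simp [pvNet]
              omega
      · have : (top != item) = true := by simp [ht]
        simp only [this, if_true]
        constructor
        · cases h with
          | inl hh => exact Or.inl (fun x hx => hh _ (by simp [hx]))
          | inr hh => exact Or.inr (fun x hx => hh _ (by simp [hx]))
        · -- top ≠ item, both in {left,right} forces top to be the opposite of item... 
          -- but top is only known homogeneous; need top ∈ {"left","right"}? top could be junk? 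
          -- pvHom says top = "right" or "left", good.
          have htop : top = "right" ∨ top = "left" := by
            cases h with
            | inl hh => exact Or.inl (hh _ (by simp))
            | inr hh => exact Or.inr (hh _ (by simp))
          rcases hi with h' | h' <;> subst h' <;>
            rcases htop with rfl | rfl <;> simp_all [pvNet] <;> omega
  · have hb : (item == "left" || item == "right") = false := by
      push Not at hi; simp [hi.1, hi.2]
    rw [hb]
    simp only [Bool.false_eq_true, if_false]
    refine ⟨h, ?_⟩
    push Not at hi
    simp [pvNet, hi.1, hi.2]

theorem foldl_spinStep (lst : List String) (s : List String) (h : pvHom s) :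
    pvHom (lst.foldl spinStep s) ∧ pvNet (lst.foldl spinStep s) = pvNet s + pvNet lst := by
  induction lst generalizing s with
  | nil => simpa [pvNet] using h
  | cons x xs ih =>
    obtain ⟨h1, h2⟩ := spinStep_inv s x h
    obtain ⟨h3, h4⟩ := ih _ h1
    refine ⟨h3, ?_⟩
    rw [List.foldl_cons] at *
    rw [h4, h2]
    simp [pvNet]
    by_cases hr : x = "right" <;> by_cases hl : x = "left" <;> simp [hr, hl] <;> omega

theorem foldl_degree (lst : List String) (d : Int) :
    lst.foldl (fun d item =>
      if item == "right" then d + 90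
      else if item == "left" then d - 90
      else d) d = d + 90 * pvNet lst := by
  induction lst generalizing d with
  | nil => simp [pvNet]
  | cons x xs ih =>
    simp only [List.foldl_cons, ih, pvNet, List.count_cons]
    by_cases hr : x = "right" <;> by_cases hl : x = "left" <;>
      simp [hr, hl] <;> ring

-- ===== VERDICT (by name: the statement is the Claim_ definition above) =====
theorem spin_around_spec : Claim_equal_spin_around := by
  intro lst _
  unfold Spec_spin_around
  show spin_around lst = spin_around_alt lst
  obtain ⟨hH, hV⟩ := foldl_spinStep lst [] (Or.inl (by simp))
  have hlen : ((List.foldl spinStep [] lst).length : Int) = |pvNet lst| := by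
    rw [pvHom_len _ hH, hV]; simp [pvNet]
  simp only [spin_around, spin_around_alt, foldl_degree, hlen, zero_add]
  rw [PySem.Int.floordiv_eq_ediv_of_pos (by norm_num : (0:Int) < 360),
      PySem.Int.floordiv_eq_ediv_of_pos (by norm_num : (0:Int) < 4), abs_mul]
  norm_num
  omega
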